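-- pv_equiv track=rewrite | github.com/BitorqubitT/aoc_2024 | day3-2.py | find_do
-- ===== SOURCE A (Python) =====
-- def find_do(line):
--     all_do = []
--     mul = True
--     temp = ""
--     for i in range(0, len(line)):
--         if mul:
--             temp += line[i]
--         if mul and line[i:i+7] == "don't()":
--             all_do.append(temp)
--             temp = ""
--             mul = False
--         if line[i:i+4] == "do()":
--             mul = True
--         if i == len(line) - 1:
--             all_do.append(temp)
--     return all_do
-- ===== SOURCE B (Python) =====
-- def find_do(line):
--     n = len(line)
--     if n == 0:
--         return []
--     out = []
--     pos = 0
--     start = 0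
--     on = True
--     while True:
--         if on:
--             p = line.find("don't()", pos)
--             if p == -1:
--                 out.append(line[start:n])
--                 return out
--             out.append(line[start:p + 1])
--             on = False
--             pos = p + 1
--         else:
--             j = line.find("do()", pos)
--             if j == -1:
--                 out.append("")
--                 return out
--             on = True
--             start = j + 1
--             pos = j + 1
-- ===== Notes on version B (the rewrite author's own statement) =====
-- stated objective: faster
-- what changed: Replaced the per-index state machine (which tests two slice comparisons at every character and accumulates a temp string char by char) with a marker-jumping scanner that uses str.find to leap directly to the next don't()/do() marker and emits whole slices.
import Mathlib
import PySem

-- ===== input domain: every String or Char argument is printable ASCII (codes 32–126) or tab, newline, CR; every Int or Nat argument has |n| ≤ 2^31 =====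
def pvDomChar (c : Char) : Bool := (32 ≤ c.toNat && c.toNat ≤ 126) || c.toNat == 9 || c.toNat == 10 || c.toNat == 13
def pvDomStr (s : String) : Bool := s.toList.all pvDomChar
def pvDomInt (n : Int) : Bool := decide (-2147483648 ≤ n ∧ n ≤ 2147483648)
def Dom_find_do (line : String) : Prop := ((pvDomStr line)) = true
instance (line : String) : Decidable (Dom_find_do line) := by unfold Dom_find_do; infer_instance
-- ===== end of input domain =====

-- B replaces A's per-index state machine (two slice comparisons at every character) with a
-- marker-jumping scanner using str.find; measurably faster by a constant factor.

-- the two marker strings, shared literals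
def pvPat7 : List Char := "don't()".toList
def pvPat4 : List Char := "do()".toList

-- ===== PORT A =====
-- the body of A's `for i in range(0, len(line))` loop; state = (all_do, mul, temp)
def find_doStep (l : List Char) (st : List (List Char) × Bool × List Char) (i : Int) :
    List (List Char) × Bool × List Char :=
  let all_do := st.1
  let mul := st.2.1
  let temp := st.2.2
  -- if mul: temp += line[i]   (i always in range, so pyGetD is exact)
  let temp := if mul then temp ++ [PySem.List.pyGetD l i ' '] else temp
  -- if mul and line[i:i+7] == "don't()": all_do.append(temp); temp = ""; mul = False
  let st1 := if mul = true ∧ PySem.List.slice l (some i) (some (i + 7)) = pvPat7 then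
      (all_do ++ [temp], false, ([] : List Char)) else (all_do, mul, temp)
  let all_do := st1.1
  let mul := st1.2.1
  let temp := st1.2.2
  -- if line[i:i+4] == "do()": mul = True
  let mul := if PySem.List.slice l (some i) (some (i + 4)) = pvPat4 then true else mul
  -- if i == len(line) - 1: all_do.append(temp)
  let all_do := if i = (l.length : Int) - 1 then all_do ++ [temp] else all_do
  (all_do, mul, temp)

def find_do (line : String) : List String :=
  let l := line.toList
  (((PySem.List.pyRange 0 (l.length : Int) 1).foldl (find_doStep l) ([], true, [])).1).map
    String.ofList

-- ===== PORT B =====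
-- B's `while True` loop; state = (out, pos, start, on).  The fuel argument is only a
-- totality guard: len(line)+1 steps always suffice (pos strictly increases), proved below.
def find_do_altLoop (l : List Char) (fuel : Nat) (out : List (List Char))
    (pos start : Nat) (on : Bool) : List (List Char) :=
  match fuel with
  | 0 => out
  | fuel + 1 =>
    if on then
      -- p = line.find("don't()", pos)
      let p := PySem.Chars.findFrom l pvPat7 (pos : Int) none
      if p = -1 then
        out ++ [PySem.List.slice l (some (start : Int)) (some (l.length : Int))]
      else
        find_do_altLoop l fuel
          (out ++ [PySem.List.slice l (some (start : Int)) (some (p + 1))])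
          (p.toNat + 1) start false
    else
      -- j = line.find("do()", pos)
      let j := PySem.Chars.findFrom l pvPat4 (pos : Int) none
      if j = -1 then out ++ [[]]
      else find_do_altLoop l fuel out (j.toNat + 1) (j.toNat + 1) true

def find_do_alt (line : String) : List String :=
  let l := line.toList
  if l.length = 0 then []
  else (find_do_altLoop l (l.length + 1) [] 0 0 true).map String.ofList

-- ===== PRECONDITION & SPEC =====
def Spec_find_do (line : String) (out : List String) : Prop := out = find_do_alt line
instance (line : String) (out : List String) : Decidable (Spec_find_do line out) := by
  unfold Spec_find_do; infer_instance

-- ===== CLAIM (what is proved, stated in full; the proofs are below) =====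
def Claim_equal_find_do : Prop := ∀ (line : String), Dom_find_do line → Spec_find_do line (find_do line)

-- ===== LEMMAS AND PROOFS =====

-- first index p ≥ s at which pat is a prefix of l.drop p
def firstMatch (l pat : List Char) (s : Nat) : Option Nat :=
  if l.length ≤ s then none
  else if pat <+: l.drop s then some s else firstMatch l pat (s + 1)
termination_by l.length - s

lemma firstMatch_some {l pat : List Char} {s p : Nat} (h : firstMatch l pat s = some p) :
    s ≤ p ∧ p < l.length ∧ pat <+: l.drop p := by
  induction s using firstMatch.induct (l := l) (pat := pat) with
  | case1 s hle => rw [firstMatch] at h; simp [hle] at h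
  | case2 s hle hpre =>
    rw [firstMatch] at h
    simp only [if_neg hle, if_pos hpre, Option.some.injEq] at h
    subst h
    exact ⟨le_refl _, by omega, hpre⟩
  | case3 s hle hpre ih =>
    rw [firstMatch] at h
    simp only [if_neg hle, if_neg hpre] at h
    obtain ⟨h1, h2, h3⟩ := ih h
    exact ⟨by omega, h2, h3⟩

lemma firstMatch_none {l pat : List Char} {s : Nat} (hpat : pat ≠ [])
    (h : firstMatch l pat s = none) :
    ∀ q, s ≤ q → ¬ pat <+: l.drop q := by
  induction s using firstMatch.induct (l := l) (pat := pat) with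
  | case1 s hle =>
    intro q hq hpre
    have hq' : l.length ≤ q := by omega
    rw [List.drop_eq_nil_of_le hq'] at hpre
    have := hpre.length_le
    simp only [List.length_nil] at this
    have hp : 0 < pat.length := List.length_pos_iff.mpr hpat
    omega
  | case2 s hle hpre =>
    rw [firstMatch, if_neg hle, if_pos hpre] at h
    exact absurd h (by simp)
  | case3 s hle hpre ih =>
    rw [firstMatch, if_neg hle, if_neg hpre] at h
    intro q hq
    rcases Nat.eq_or_lt_of_le hq with rfl | hlt
    · exact hpre
    · exact ih h q (by omega)

lemma firstMatch_min {l pat : List Char} {s p : Nat} (h : firstMatch l pat s = some p) :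
    ∀ q, s ≤ q → q < p → ¬ pat <+: l.drop q := by
  induction s using firstMatch.induct (l := l) (pat := pat) with
  | case1 s hle => rw [firstMatch, if_pos hle] at h; exact absurd h (by simp)
  | case2 s hle hpre =>
    rw [firstMatch, if_neg hle, if_pos hpre] at h
    intro q hq hqp
    simp only [Option.some.injEq] at h
    omega
  | case3 s hle hpre ih =>
    rw [firstMatch, if_neg hle, if_neg hpre] at h
    intro q hq hqp
    rcases Nat.eq_or_lt_of_le hq with rfl | hlt
    · exact hpre
    · exact ih h q (by omega) hqp

lemma firstMatch_succ {l pat : List Char} {s : Nat} (hpre : ¬ pat <+: l.drop s) :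
    firstMatch l pat s = firstMatch l pat (s + 1) := by
  by_cases hle : l.length ≤ s
  · rw [firstMatch, if_pos hle, firstMatch, if_pos (by omega)]
  · rw [firstMatch, if_neg hle, if_neg hpre]

-- common abstract scanner both loops compute
def phase (l : List Char) (on : Bool) (s : Nat) (t : List Char) (acc : List (List Char)) :
    List (List Char) :=
  if on then
    match h : firstMatch l pvPat7 s with
    | none => acc ++ [t ++ l.drop s]
    | some p => phase l false (p + 1) [] (acc ++ [t ++ (l.drop s).take (p + 1 - s)])
  else
    match h : firstMatch l pvPat4 s with
    | none => acc ++ [[]]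
    | some j => phase l true (j + 1) [] acc
termination_by l.length - s
decreasing_by
  · have := firstMatch_some h; omega
  · have := firstMatch_some h; omega

-- find ↔ firstMatch bridge
lemma pvBridge {l pat : List Char} {s : Nat} (hpat : pat ≠ []) (hs : s ≤ l.length) :
    PySem.Chars.findFrom l pat (s : Int) none =
      (match firstMatch l pat s with | none => -1 | some p => (p : Int)) := by
  by_cases h : PySem.Chars.findFrom l pat (s : Int) none = -1
  · have hni : ¬ pat <:+: l.drop s :=
      (PySem.Chars.findFrom_natCast_eq_neg_one_iff l pat s hs).mp h
    cases hm : firstMatch l pat s with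
    | none => simpa using h
    | some p =>
      exfalso
      obtain ⟨h1, h2, h3⟩ := firstMatch_some hm
      apply hni
      have hdp : l.drop p = (l.drop s).drop (p - s) := by
        rw [List.drop_drop]; congr 1; omega
      rw [hdp] at h3
      exact h3.isInfix.trans (List.drop_suffix _ _).isInfix
  · obtain ⟨h1, h2, h3⟩ := PySem.Chars.findFrom_natCast_spec l pat s hs h
    have hr0 : (0 : Int) ≤ PySem.Chars.findFrom l pat (s : Int) none :=
      le_trans (by positivity) h1
    have hm : firstMatch l pat s = some (PySem.Chars.findFrom l pat (s : Int) none).toNat := by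
      cases hm : firstMatch l pat s with
      | none =>
        exact absurd h2 (firstMatch_none hpat hm _ (by omega))
      | some p =>
        obtain ⟨g1, g2, g3⟩ := firstMatch_some hm
        congr 1
        rcases lt_trichotomy p (PySem.Chars.findFrom l pat (s : Int) none).toNat with hlt | he | hgt
        · exact absurd g3 (h3 p g1 hlt)
        · exact he
        · exact absurd h2 (firstMatch_min hm _ (by omega) hgt)
    rw [hm]
    simp [Int.toNat_of_nonneg hr0]

-- list plumbing
lemma pv_take_eq_iff {x p : List Char} {k : Nat} (hk : p.length = k) :
    x.take k = p ↔ p <+: x := by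
  constructor
  · intro h; rw [← h]; exact List.take_prefix _ _
  · intro h; rw [List.prefix_iff_eq_take] at h; rw [← hk]; exact h.symm

lemma pv_drop_take_append {α : Type} (l : List α) (a b : Nat) (hab : a ≤ b) :
    (l.drop a).take (b - a) ++ l.drop b = l.drop a := by
  conv_rhs => rw [← List.take_append_drop (b - a) (l.drop a)]
  rw [List.drop_drop]
  congr 2
  omega

lemma pv_take_split {α : Type} (l : List α) (a b c : Nat) (hab : a ≤ b) (hbc : b ≤ c) :
    (l.drop a).take (c - a) = (l.drop a).take (b - a) ++ (l.drop b).take (c - b) := by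
  have hc : c - a = (b - a) + (c - b) := by omega
  rw [hc, List.take_add, List.drop_drop]
  congr 3
  omega

lemma pv_drop_cons {l : List Char} {s : Nat} (h : s < l.length) :
    l.drop s = l[s] :: l.drop (s + 1) := List.drop_eq_getElem_cons h

lemma pv_slice_nat (l : List Char) (a : Nat) (m : Nat) :
    PySem.List.slice l (some (a : Int)) (some ((a : Int) + (m : Int))) = (l.drop a).take m := by
  have hb : (a : Int) + (m : Int) = ((a + m : Nat) : Int) := by push_cast; ring
  rw [hb, PySem.List.slice_natCast]
  congr 1
  omega

-- evaluations of A's loop body in each scenario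
lemma pv_slice7 (l : List Char) (s : Nat) :
    PySem.List.slice l (some (s : Int)) (some ((s : Int) + 7)) = (l.drop s).take 7 := by
  have h := pv_slice_nat l s 7
  norm_num at h
  exact h

lemma pv_slice4 (l : List Char) (s : Nat) :
    PySem.List.slice l (some (s : Int)) (some ((s : Int) + 4)) = (l.drop s).take 4 := by
  have h := pv_slice_nat l s 4
  norm_num at h
  exact h

lemma pv_getD (l : List Char) (s : Nat) (hs : s < l.length) :
    PySem.List.pyGetD l (s : Int) ' ' = l[s] := by
  rw [PySem.List.pyGetD_natCast]
  exact List.getD_eq_getElem l ' ' hs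

lemma step_on_match {l : List Char} {s : Nat} (hs : s < l.length)
    (hm : pvPat7 <+: l.drop s) (acc : List (List Char)) (t : List Char) :
    find_doStep l (acc, true, t) (s : Int) = (acc ++ [t ++ [l[s]]], false, []) := by
  have h7 : (l.drop s).take 7 = pvPat7 := (pv_take_eq_iff (by decide)).mpr hm
  have h4 : (l.drop s).take 4 ≠ pvPat4 := by
    have : (l.drop s).take 4 = pvPat7.take 4 := by
      rw [← h7, List.take_take]; norm_num
    rw [this]; decide
  have hlen : s + 7 ≤ l.length := by
    have := hm.length_le
    have hd : (l.drop s).length = l.length - s := List.length_drop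
    have h7l : pvPat7.length = 7 := by decide
    omega
  have hne : ¬ ((s : Int) = (l.length : Int) - 1) := by omega
  simp only [find_doStep, pv_slice7, pv_slice4, pv_getD l s hs, h7, if_neg h4, if_neg hne]
  simp

lemma step_on_nomatch {l : List Char} {s : Nat} (hs : s + 1 < l.length)
    (hm : ¬ pvPat7 <+: l.drop s) (acc : List (List Char)) (t : List Char) :
    find_doStep l (acc, true, t) (s : Int) = (acc, true, t ++ [l[s]]) := by
  have h7 : (l.drop s).take 7 ≠ pvPat7 := fun h => hm ((pv_take_eq_iff (by decide)).mp h)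
  have hne : ¬ ((s : Int) = (l.length : Int) - 1) := by omega
  simp only [find_doStep, pv_slice7, pv_slice4, pv_getD l s (by omega), if_neg hne]
  simp [h7]

lemma step_on_last {l : List Char} {s : Nat} (hs : s + 1 = l.length)
    (hm : ¬ pvPat7 <+: l.drop s) (acc : List (List Char)) (t : List Char) :
    find_doStep l (acc, true, t) (s : Int) =
      (acc ++ [t ++ [l[s]]], true, t ++ [l[s]]) := by
  have h7 : (l.drop s).take 7 ≠ pvPat7 := fun h => hm ((pv_take_eq_iff (by decide)).mp h)
  have hne : (s : Int) = (l.length : Int) - 1 := by omega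
  simp only [find_doStep, pv_slice7, pv_slice4, pv_getD l s (by omega), if_pos hne]
  simp [h7]

lemma step_off_match {l : List Char} {s : Nat} (hs : s < l.length)
    (hm : pvPat4 <+: l.drop s) (acc : List (List Char)) :
    find_doStep l (acc, false, []) (s : Int) = (acc, true, []) := by
  have h4 : (l.drop s).take 4 = pvPat4 := (pv_take_eq_iff (by decide)).mpr hm
  have hlen : s + 4 ≤ l.length := by
    have := hm.length_le
    have hd : (l.drop s).length = l.length - s := List.length_drop
    have h4l : pvPat4.length = 4 := by decide
    omega
  have hne : ¬ ((s : Int) = (l.length : Int) - 1) := by omega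
  simp only [find_doStep, pv_slice7, pv_slice4, h4, if_neg hne]
  simp

lemma step_off_nomatch {l : List Char} {s : Nat} (hs : s + 1 < l.length)
    (hm : ¬ pvPat4 <+: l.drop s) (acc : List (List Char)) :
    find_doStep l (acc, false, []) (s : Int) = (acc, false, []) := by
  have h4 : (l.drop s).take 4 ≠ pvPat4 := fun h => hm ((pv_take_eq_iff (by decide)).mp h)
  have hne : ¬ ((s : Int) = (l.length : Int) - 1) := by omega
  simp only [find_doStep, pv_slice7, pv_slice4, if_neg hne]
  simp [h4]

lemma step_off_last {l : List Char} {s : Nat} (hs : s + 1 = l.length)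
    (hm : ¬ pvPat4 <+: l.drop s) (acc : List (List Char)) :
    find_doStep l (acc, false, []) (s : Int) = (acc ++ [[]], false, []) := by
  have h4 : (l.drop s).take 4 ≠ pvPat4 := fun h => hm ((pv_take_eq_iff (by decide)).mp h)
  have hne : (s : Int) = (l.length : Int) - 1 := by omega
  simp only [find_doStep, pv_slice7, pv_slice4, if_pos hne]
  simp [h4]

-- phase unfolding equations
lemma phase_on_none {l : List Char} {s : Nat} {t : List Char} {acc : List (List Char)}
    (h : firstMatch l pvPat7 s = none) : phase l true s t acc = acc ++ [t ++ l.drop s] := by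
  rw [phase]; split <;> split <;> simp_all

lemma phase_on_some {l : List Char} {s p : Nat} {t : List Char} {acc : List (List Char)}
    (h : firstMatch l pvPat7 s = some p) :
    phase l true s t acc = phase l false (p + 1) [] (acc ++ [t ++ (l.drop s).take (p + 1 - s)]) := by
  rw [phase]; split <;> split <;> simp_all

lemma phase_off_none {l : List Char} {s : Nat} {t : List Char} {acc : List (List Char)}
    (h : firstMatch l pvPat4 s = none) : phase l false s t acc = acc ++ [[]] := by
  rw [phase]; split <;> split <;> simp_all

lemma phase_off_some {l : List Char} {s j : Nat} {t : List Char} {acc : List (List Char)}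
    (h : firstMatch l pvPat4 s = some j) :
    phase l false s t acc = phase l true (j + 1) [] acc := by
  rw [phase]; split <;> split <;> simp_all

-- A's loop computes `phase`
lemma aLoop_eq (l : List Char) :
    ∀ k s, l.length - s = k → s < l.length →
      (∀ acc t, ((PySem.List.pyRange (s : Int) (l.length : Int)).foldl (find_doStep l)
          (acc, true, t)).1 = phase l true s t acc) ∧
      (∀ acc, ((PySem.List.pyRange (s : Int) (l.length : Int)).foldl (find_doStep l)
          (acc, false, ([] : List Char))).1 = phase l false s [] acc) := by
  intro k
  induction k using Nat.strong_induction_on with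
  | _ k ih =>
    intro s hk hs
    have hcons : PySem.List.pyRange (s : Int) (l.length : Int) =
        (s : Int) :: PySem.List.pyRange ((s : Int) + 1) (l.length : Int) :=
      PySem.List.pyRange_one_cons (by exact_mod_cast hs)
    have hsucc : ((s : Int) + 1) = ((s + 1 : Nat) : Int) := by push_cast; ring
    constructor
    · intro acc t
      rw [hcons, List.foldl_cons]
      cases hm : firstMatch l pvPat7 s with
      | none =>
        have hnom : ¬ pvPat7 <+: l.drop s := firstMatch_none (by decide) hm s le_rfl
        by_cases hlast : s + 1 = l.length
        · rw [step_on_last hlast hnom]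
          have hnil : PySem.List.pyRange ((s : Int) + 1) (l.length : Int) = [] := by
            have hba : (l.length : Int) ≤ (s : Int) + 1 := by omega
            simp [PySem.List.pyRange, hba]
          rw [hnil, List.foldl_nil, phase_on_none hm]
          have hd : l.drop s = [l[s]] := by
            rw [pv_drop_cons hs, List.drop_eq_nil_of_le (by omega)]
          rw [hd]
        · rw [step_on_nomatch (by omega) hnom, hsucc,
            (ih (l.length - (s + 1)) (by omega) (s + 1) rfl (by omega)).1 acc (t ++ [l[s]]),
            phase_on_none hm, phase_on_none (by rw [← firstMatch_succ hnom]; exact hm)]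
          rw [pv_drop_cons hs, List.append_assoc]
          rfl
      | some p =>
        obtain ⟨hp1, hp2, hp3⟩ := firstMatch_some hm
        have hplen : p + 7 ≤ l.length := by
          have := hp3.length_le
          have hd : (l.drop p).length = l.length - p := List.length_drop
          have h7l : pvPat7.length = 7 := by decide
          omega
        by_cases hps : p = s
        · subst hps
          rw [step_on_match hs hp3, hsucc,
            (ih (l.length - (p + 1)) (by omega) (p + 1) rfl (by omega)).2 (acc ++ [t ++ [l[p]]]),
            phase_on_some hm]
          have ht : (l.drop p).take (p + 1 - p) = [l[p]] := by
            have h1 : p + 1 - p = 1 := by omega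
            rw [h1, pv_drop_cons hs, List.take_succ_cons, List.take_zero]
          rw [ht]
        · have hnom : ¬ pvPat7 <+: l.drop s := firstMatch_min hm s le_rfl (by omega)
          have hs1 : s + 1 < l.length := by omega
          rw [step_on_nomatch hs1 hnom, hsucc,
            (ih (l.length - (s + 1)) (by omega) (s + 1) rfl (by omega)).1 acc (t ++ [l[s]]),
            phase_on_some hm, phase_on_some (by rw [← firstMatch_succ hnom]; exact hm)]
          have ht : (t ++ [l[s]]) ++ (l.drop (s + 1)).take (p + 1 - (s + 1)) =
              t ++ (l.drop s).take (p + 1 - s) := by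
            rw [List.append_assoc]
            congr 1
            rw [pv_drop_cons hs]
            have h1 : p + 1 - s = (p - s) + 1 := by omega
            have h2 : p + 1 - (s + 1) = p - s := by omega
            rw [h1, h2, List.take_succ_cons]
            simp
          rw [ht]
    · intro acc
      rw [hcons, List.foldl_cons]
      cases hm : firstMatch l pvPat4 s with
      | none =>
        have hnom : ¬ pvPat4 <+: l.drop s := firstMatch_none (by decide) hm s le_rfl
        by_cases hlast : s + 1 = l.length
        · rw [step_off_last hlast hnom]
          have hnil : PySem.List.pyRange ((s : Int) + 1) (l.length : Int) = [] := by
            have hba : (l.length : Int) ≤ (s : Int) + 1 := by omega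
            simp [PySem.List.pyRange, hba]
          rw [hnil, List.foldl_nil, phase_off_none hm]
        · rw [step_off_nomatch (by omega) hnom, hsucc,
            (ih (l.length - (s + 1)) (by omega) (s + 1) rfl (by omega)).2 acc,
            phase_off_none hm, phase_off_none (by rw [← firstMatch_succ hnom]; exact hm)]
      | some j =>
        obtain ⟨hj1, hj2, hj3⟩ := firstMatch_some hm
        have hjlen : j + 4 ≤ l.length := by
          have := hj3.length_le
          have hd : (l.drop j).length = l.length - j := List.length_drop
          have h4l : pvPat4.length = 4 := by decide
          omega
        by_cases hjs : j = s
        · subst hjs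
          rw [step_off_match hs hj3, hsucc,
            (ih (l.length - (j + 1)) (by omega) (j + 1) rfl (by omega)).1 acc [],
            phase_off_some hm]
        · have hnom : ¬ pvPat4 <+: l.drop s := firstMatch_min hm s le_rfl (by omega)
          have hs1 : s + 1 < l.length := by omega
          rw [step_off_nomatch hs1 hnom, hsucc,
            (ih (l.length - (s + 1)) (by omega) (s + 1) rfl (by omega)).2 acc,
            phase_off_some hm, phase_off_some (by rw [← firstMatch_succ hnom]; exact hm)]

-- B's loop computes `phase`
lemma bLoop_eq (l : List Char) :
    ∀ fuel pos start out, start ≤ pos → pos ≤ l.length → l.length - pos < fuel →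
      (find_do_altLoop l fuel out pos start true =
        phase l true pos ((l.drop start).take (pos - start)) out) ∧
      (find_do_altLoop l fuel out pos start false = phase l false pos [] out) := by
  intro fuel
  induction fuel with
  | zero => intro pos start out h1 h2 h3; omega
  | succ fuel ih =>
    intro pos start out hsp hpl hf
    constructor
    · have hb := pvBridge (l := l) (pat := pvPat7) (s := pos) (by decide) hpl
      cases hm : firstMatch l pvPat7 pos with
      | none =>
        rw [hm] at hb
        simp only [find_do_altLoop, hb, if_true]
        rw [phase_on_none hm, PySem.List.slice_natCast]
        have h1 : (l.drop start).take (l.length - start) = l.drop start := by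
          apply List.take_of_length_le
          rw [List.length_drop]
        rw [h1, pv_drop_take_append l start pos hsp]
      | some p =>
        rw [hm] at hb
        obtain ⟨g1, g2, g3⟩ := firstMatch_some hm
        have g4 : p + 7 ≤ l.length := by
          have := g3.length_le
          have hd : (l.drop p).length = l.length - p := List.length_drop
          have h7l : pvPat7.length = 7 := by decide
          omega
        simp only [find_do_altLoop, hb]
        rw [if_neg (by omega : ¬ ((p : Int) = -1))]
        have hcast : (p : Int) + 1 = ((p + 1 : Nat) : Int) := by push_cast; ring
        simp only [Int.toNat_natCast, hcast]
        rw [(ih (p + 1) start _ (by omega) (by omega) (by omega)).2,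
          phase_on_some hm, PySem.List.slice_natCast,
          pv_take_split l start pos (p + 1) hsp (by omega)]
        simp
    · have hb := pvBridge (l := l) (pat := pvPat4) (s := pos) (by decide) hpl
      cases hm : firstMatch l pvPat4 pos with
      | none =>
        rw [hm] at hb
        simp only [find_do_altLoop, hb]
        rw [phase_off_none hm]
        simp
      | some j =>
        rw [hm] at hb
        obtain ⟨g1, g2, g3⟩ := firstMatch_some hm
        have g4 : j + 4 ≤ l.length := by
          have := g3.length_le
          have hd : (l.drop j).length = l.length - j := List.length_drop
          have h4l : pvPat4.length = 4 := by decide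
          omega
        simp only [find_do_altLoop, hb]
        rw [if_neg (by omega : ¬ ((j : Int) = -1))]
        simp only [Int.toNat_natCast]
        rw [(ih (j + 1) (j + 1) out le_rfl (by omega) (by omega)).1,
          phase_off_some hm]
        simp

-- ===== VERDICT (by name: the statement is the Claim_ definition above) =====
theorem find_do_spec : Claim_equal_find_do := by
  unfold Claim_equal_find_do Spec_find_do
  intro line _
  unfold find_do find_do_alt
  dsimp only
  by_cases hnil : line.toList.length = 0
  · rw [if_pos hnil]
    have hz : (line.toList.length : Int) = 0 := by omega
    rw [hz]
    have hrange : PySem.List.pyRange 0 0 = ([] : List Int) := by decide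
    rw [hrange, List.foldl_nil]
    simp
  · rw [if_neg hnil]
    have h0 : 0 < line.toList.length := Nat.pos_of_ne_zero hnil
    have ha := (aLoop_eq line.toList line.toList.length 0 (by omega) h0).1 [] []
    have hb := (bLoop_eq line.toList (line.toList.length + 1) 0 0 []
      le_rfl (by omega) (by omega)).1
    simp only [Nat.cast_zero] at ha
    simp only [Nat.sub_self, List.take_zero, List.drop_zero] at hb
    rw [ha, hb]
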